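-- pv_equiv track=rewrite | github.com/juanfal/AE-3 | rae3.py | build
-- ===== SOURCE A (Python) =====
-- def build(base, ranges, sep):
--     tsep = ""
--     commandList = [base]
--     for theName, theRange in ranges:
--         temp = []
--         for i in theRange:
--             for prev in commandList:
--                 temp += [prev + tsep + theName + str(i)]
--         commandList = temp
--         tsep = sep
--     return commandList
-- ===== SOURCE B (Python) =====
-- def build(base, ranges, sep):
--     # Build the combination tuples back-to-front by recursion on the ranges
--     # (later ranges vary slowest, the first range fastest), then join once.
--     def rec(i):
--         if i == len(ranges):
--             return [[]]
--         theName, theRange = ranges[i]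
--         tails = rec(i + 1)
--         return [[theName + str(v)] + t for t in tails for v in theRange]
--     return [base + sep.join(combo) for combo in rec(0)]
-- ===== Notes on version B (the rewrite author's own statement) =====
-- stated objective: alternative
-- what changed: B builds the combination lists once by recursion on the ranges suffix (later ranges varying slowest) and joins each combination with sep in a single pass, instead of A's iterative rebuilding of the whole command list as growing prefixes at every range.
import Mathlib
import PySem

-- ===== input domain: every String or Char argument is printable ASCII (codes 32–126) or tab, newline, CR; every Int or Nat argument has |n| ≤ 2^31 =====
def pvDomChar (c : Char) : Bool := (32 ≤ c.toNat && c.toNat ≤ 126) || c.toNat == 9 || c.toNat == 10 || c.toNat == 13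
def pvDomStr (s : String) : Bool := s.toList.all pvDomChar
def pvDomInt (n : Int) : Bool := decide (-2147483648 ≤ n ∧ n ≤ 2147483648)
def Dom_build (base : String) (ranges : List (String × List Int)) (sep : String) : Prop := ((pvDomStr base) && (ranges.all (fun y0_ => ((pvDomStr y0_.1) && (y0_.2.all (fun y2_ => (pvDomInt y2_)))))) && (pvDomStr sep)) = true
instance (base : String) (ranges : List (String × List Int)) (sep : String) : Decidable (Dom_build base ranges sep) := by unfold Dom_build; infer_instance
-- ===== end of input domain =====

-- B builds each result string once from recursively-built combination lists (joined with sep),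
-- instead of A's repeated rebuilding of the whole command list as growing prefixes (alternative decomposition).


-- ===== PORT A =====
def build (base : String) (ranges : List (String × List Int)) (sep : String) : List String :=
  let st := ranges.foldl (fun (st : String × List String) nr =>
    let temp := nr.2.foldl (fun temp i =>
      st.2.foldl (fun temp prev => temp ++ [prev ++ st.1 ++ nr.1 ++ PySem.Int.toStr i]) temp) []
    (sep, temp)) ("", [base])
  st.2

-- ===== PORT B =====
-- rec(i) over the index becomes structural recursion over the remaining suffix of ranges
def buildCombos (ranges : List (String × List Int)) : List (List String) :=
  match ranges with
  | [] => [[]]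
  | (theName, theRange) :: rest =>
    let tails := buildCombos rest
    tails.flatMap (fun t => theRange.map (fun v => (theName ++ PySem.Int.toStr v) :: t))

def build_alt (base : String) (ranges : List (String × List Int)) (sep : String) : List String :=
  (buildCombos ranges).map (fun combo => base ++ PySem.Str.join sep combo)

-- ===== PRECONDITION & SPEC =====
def Spec_build (base : String) (ranges : List (String × List Int)) (sep : String) (out : List String) : Prop := out = build_alt base ranges sep
instance (base : String) (ranges : List (String × List Int)) (sep : String) (out : List String) : Decidable (Spec_build base ranges sep out) := by unfold Spec_build; infer_instance

-- ===== CLAIM (what is proved, stated in full; the proofs are below) =====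
def Claim_equal_build : Prop := ∀ (base : String) (ranges : List (String × List Int)) (sep : String), Dom_build base ranges sep → Spec_build base ranges sep (build base ranges sep)

-- ===== LEMMAS AND PROOFS =====

-- concatenation of " sep ++ piece " over a combination's pieces
def sfx (sep : String) (c : List String) : String := (c.map (fun p => sep ++ p)).foldr (· ++ ·) ""

theorem sfx_nil (sep : String) : sfx sep [] = "" := rfl
theorem sfx_cons (sep x : String) (c : List String) : sfx sep (x :: c) = sep ++ x ++ sfx sep c := by
  simp [sfx, String.append_assoc]

theorem join_eq_sfx (sep x : String) (c : List String) :
    PySem.Str.join sep (x :: c) = x ++ sfx sep c := by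
  induction c generalizing x with
  | nil =>
    apply String.toList_inj.mp
    simp [PySem.Str.toList_join, PySem.Chars.join_singleton, sfx_nil]
  | cons y c ih =>
    apply String.toList_inj.mp
    have h2 := congrArg String.toList (ih y)
    simp only [PySem.Str.toList_join, List.map_cons, PySem.Chars.join_cons_cons] at *
    simp [h2, sfx_cons, List.append_assoc]

theorem foldl_app {α β : Type} (f : α → β) (l : List α) (acc : List β) :
    l.foldl (fun t x => t ++ [f x]) acc = acc ++ l.map f := by
  induction l generalizing acc with
  | nil => simp
  | cons x l ih => simp [ih]

theorem foldl_app2 {α β : Type} (f : α → List β) (l : List α) (acc : List β) :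
    l.foldl (fun t x => t ++ f x) acc = acc ++ l.flatMap f := by
  induction l generalizing acc with
  | nil => simp
  | cons x l ih => simp [ih]

-- invariant of A's outer loop once tsep has become sep
theorem loop_eq (sep : String) (rs : List (String × List Int)) (cl : List String) :
    (rs.foldl (fun (st : String × List String) nr =>
      let temp := nr.2.foldl (fun temp i =>
        st.2.foldl (fun temp prev => temp ++ [prev ++ st.1 ++ nr.1 ++ PySem.Int.toStr i]) temp) []
      (sep, temp)) (sep, cl)).2
    = (buildCombos rs).flatMap (fun c => cl.map (fun p => p ++ sfx sep c)) := by
  induction rs generalizing cl with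
  | nil => simp [buildCombos, sfx_nil]
  | cons nr rest ih =>
    obtain ⟨n, r⟩ := nr
    simp only [List.foldl_cons]
    have hstep : ∀ (t : String) (c : List String),
        r.foldl (fun temp i =>
          c.foldl (fun temp prev => temp ++ [prev ++ t ++ n ++ PySem.Int.toStr i]) temp) []
        = r.flatMap (fun i => c.map (fun prev => prev ++ t ++ n ++ PySem.Int.toStr i)) := by
      intro t c
      simp only [foldl_app]
      rw [foldl_app2 (fun i => c.map (fun prev => prev ++ t ++ n ++ PySem.Int.toStr i)) r []]
      simp
    simp only [hstep]
    rw [ih]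
    simp only [buildCombos, List.flatMap_assoc, List.flatMap_map, List.map_flatMap]
    apply List.flatMap_congr
    intro c _
    apply List.flatMap_congr
    intro i _
    simp only [List.map_map]
    apply List.map_congr_left
    intro p _
    simp [sfx_cons, String.append_assoc]

theorem build_eq (base : String) (ranges : List (String × List Int)) (sep : String) :
    build base ranges sep = build_alt base ranges sep := by
  cases ranges with
  | nil =>
    simp [build, build_alt, buildCombos]
    apply String.toList_inj.mp
    simp [PySem.Str.toList_join, PySem.Chars.join_nil]
  | cons nr rest =>
    obtain ⟨n, r⟩ := nr
    unfold build
    simp only [List.foldl_cons]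
    rw [loop_eq]
    unfold build_alt
    simp only [buildCombos, List.map_flatMap, List.map_map]
    simp only [List.foldl_nil]
    rw [foldl_app (fun i => base ++ "" ++ n ++ PySem.Int.toStr i) r []]
    simp only [List.nil_append]
    apply List.flatMap_congr
    intro c _
    simp only [List.map_map]
    apply List.map_congr_left
    intro i _
    simp [join_eq_sfx, String.append_assoc, String.append_empty]

-- ===== VERDICT (by name: the statement is the Claim_ definition above) =====
theorem build_spec : Claim_equal_build := by
  intro base ranges sep _
  unfold Spec_build
  exact build_eq base ranges sep
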